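-- pv_equiv track=rewrite | github.com/koc90/part_2_homework_6 | data_generator.py | create_data_to_group_table
-- ===== SOURCE A (Python) =====
-- GROUP_SIGNS = ("C", "A", "B")
--
-- NUMBER_STUDENTS = 50
--
-- def create_data_to_group_table(student_table: list[tuple]) -> list[tuple]:
--     students_in_group = round(NUMBER_STUDENTS / len(GROUP_SIGNS))
--     group_table = []
--
--     for student in student_table:
--         group_num = student[0] % len(GROUP_SIGNS)
--         row = (GROUP_SIGNS[group_num], student[0])
--         group_table.append(row)
--
--     group_table.sort()
--
--     return group_table
-- ===== SOURCE B (Python) =====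
-- GROUP_SIGNS = ("C", "A", "B")
--
-- NUMBER_STUDENTS = 50
--
--
-- def create_data_to_group_table(student_table: list[tuple]) -> list[tuple]:
--     # Bucket student numbers per group sign, then emit the buckets in sorted
--     # sign order with numbers sorted inside each bucket: this is exactly the
--     # lexicographically sorted table A builds, without sorting tuples.
--     buckets = {}
--     for student in student_table:
--         sign = GROUP_SIGNS[student[0] % len(GROUP_SIGNS)]
--         buckets.setdefault(sign, []).append(student[0])
--
--     group_table = []
--     for sign in sorted(GROUP_SIGNS):
--         for number in sorted(buckets.get(sign, [])):
--             group_table.append((sign, number))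
--
--     return group_table
-- ===== Notes on version B (the rewrite author's own statement) =====
-- stated objective: alternative
-- what changed: Instead of building (sign, number) tuples and sorting them with a comparison sort on tuples, B buckets the student numbers into a dict keyed by group sign and emits the buckets in sorted sign order with each bucket's numbers sorted, which reproduces the lexicographic order.
import Mathlib
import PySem

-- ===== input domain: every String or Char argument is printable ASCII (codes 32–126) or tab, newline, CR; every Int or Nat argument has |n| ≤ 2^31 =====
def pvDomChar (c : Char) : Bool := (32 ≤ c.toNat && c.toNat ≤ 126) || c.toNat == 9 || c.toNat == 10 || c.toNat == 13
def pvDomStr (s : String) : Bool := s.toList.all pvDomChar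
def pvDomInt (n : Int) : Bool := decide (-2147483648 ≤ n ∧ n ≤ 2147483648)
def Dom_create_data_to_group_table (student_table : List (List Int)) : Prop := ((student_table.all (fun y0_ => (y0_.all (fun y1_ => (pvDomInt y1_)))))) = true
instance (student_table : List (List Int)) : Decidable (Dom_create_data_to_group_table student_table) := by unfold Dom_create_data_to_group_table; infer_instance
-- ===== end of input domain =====

-- B replaces A's comparison sort of (sign, number) tuples by per-sign buckets emitted in
-- sorted sign order with numbers sorted inside each bucket (objective: alternative).

-- module constant shared by both versions
def GROUP_SIGNS : List String := ["C", "A", "B"]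

-- ===== PORT A =====
-- Python's tuple comparison on (str, int) is lexicographic with strings compared by code
-- points: encoded exactly by the sort key p ↦ toLex (p.1.toList, p.2).
def create_data_to_group_table (student_table : List (List Int)) : List (String × Int) :=
  let group_table := student_table.foldl
    (fun group_table student =>
      let group_num := PySem.Int.mod ((PySem.List.pyGet? student 0).getD 0) (GROUP_SIGNS.length : Int)
      let row := ((PySem.List.pyGet? GROUP_SIGNS group_num).getD "", (PySem.List.pyGet? student 0).getD 0)
      group_table ++ [row]) []
  PySem.List.sorted group_table (fun p => toLex (p.1.toList, p.2)) false

-- ===== PORT B =====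
def create_data_to_group_table_alt (student_table : List (List Int)) : List (String × Int) :=
  let buckets := student_table.foldl
    (fun buckets student =>
      let n := (PySem.List.pyGet? student 0).getD 0
      let sign := (PySem.List.pyGet? GROUP_SIGNS (PySem.Int.mod n (GROUP_SIGNS.length : Int))).getD ""
      buckets.modify sign [] (· ++ [n]))
    (PySem.Dict.empty : PySem.Dict String (List Int))
  (PySem.List.sorted GROUP_SIGNS (fun s => s.toList) false).foldl
    (fun group_table sign =>
      group_table ++ (PySem.List.sorted (buckets.getD sign []) (fun x => x) false).map
        (fun number => (sign, number))) []

-- ===== PRECONDITION & SPEC =====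
-- Pre_ excludes tables containing an empty row: there Python A raises IndexError on student[0].
def Pre_create_data_to_group_table (student_table : List (List Int)) : Prop :=
  ∀ row ∈ student_table, row ≠ []

instance (student_table : List (List Int)) : Decidable (Pre_create_data_to_group_table student_table) := by
  unfold Pre_create_data_to_group_table; infer_instance

def pvWitness_create_data_to_group_table : List (List Int) := [[1], [2, 10], [0], [5], [-4]]

def Spec_create_data_to_group_table (student_table : List (List Int)) (out : List (String × Int)) : Prop :=
  out = create_data_to_group_table_alt student_table
instance (student_table : List (List Int)) (out : List (String × Int)) : Decidable (Spec_create_data_to_group_table student_table out) := by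
  unfold Spec_create_data_to_group_table; infer_instance

-- ===== CLAIM (what is proved, stated in full; the proofs are below) =====
def Claim_equal_create_data_to_group_table : Prop := ∀ (student_table : List (List Int)), Dom_create_data_to_group_table student_table → Pre_create_data_to_group_table student_table → Spec_create_data_to_group_table student_table (create_data_to_group_table student_table)

-- ===== LEMMAS AND PROOFS =====

-- the number, sign and row a single student contributes
def pvN (student : List Int) : Int := (PySem.List.pyGet? student 0).getD 0

def pvRow (student : List Int) : String × Int :=
  ((PySem.List.pyGet? GROUP_SIGNS (PySem.Int.mod (pvN student) (GROUP_SIGNS.length : Int))).getD "", pvN student)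

-- Python's (str, int) tuple order
def pvKey (p : String × Int) : Lex (List Char × Int) := toLex (p.1.toList, p.2)

lemma pvRow_fst (student : List Int) :
    (pvRow student).1 = "C" ∨ (pvRow student).1 = "A" ∨ (pvRow student).1 = "B" := by
  have h0 : (0:Int) ≤ PySem.Int.mod (pvN student) (GROUP_SIGNS.length : Int) :=
    PySem.Int.mod_nonneg _ (by norm_num [GROUP_SIGNS])
  have h3 : PySem.Int.mod (pvN student) (GROUP_SIGNS.length : Int) < 3 := by
    have := PySem.Int.mod_lt (pvN student) (b := (GROUP_SIGNS.length : Int)) (by norm_num [GROUP_SIGNS])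
    simpa [GROUP_SIGNS] using this
  have : PySem.Int.mod (pvN student) (GROUP_SIGNS.length : Int) = 0 ∨
      PySem.Int.mod (pvN student) (GROUP_SIGNS.length : Int) = 1 ∨
      PySem.Int.mod (pvN student) (GROUP_SIGNS.length : Int) = 2 := by omega
  rcases this with h | h | h <;> unfold pvRow <;> rw [h]
  · exact Or.inl rfl
  · exact Or.inr (Or.inl rfl)
  · exact Or.inr (Or.inr rfl)

lemma portA_eq (student_table : List (List Int)) :
    create_data_to_group_table student_table =
      PySem.List.sorted (student_table.map pvRow) pvKey false := by
  show PySem.List.sorted (student_table.foldl (fun acc st => acc ++ [pvRow st]) []) pvKey false = _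
  rw [PySem.List.foldl_append_singleton_eq_map, List.nil_append]

lemma portB_eq (student_table : List (List Int)) :
    create_data_to_group_table_alt student_table =
      (["A", "B", "C"] : List String).flatMap (fun s =>
        (PySem.List.sorted (((student_table.map pvRow).filter (fun p => p.1 == s)).map (·.2))
          (fun x => x) false).map (fun number => (s, number))) := by
  have hsigns : PySem.List.sorted GROUP_SIGNS (fun s => s.toList) false = ["A", "B", "C"] := by decide
  have hfold : student_table.foldl
      (fun (buckets : PySem.Dict String (List Int)) student =>
        buckets.modify ((PySem.List.pyGet? GROUP_SIGNS
          (PySem.Int.mod ((PySem.List.pyGet? student 0).getD 0) (GROUP_SIGNS.length : Int))).getD "")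
          [] (· ++ [(PySem.List.pyGet? student 0).getD 0]))
      PySem.Dict.empty =
      (student_table.map pvRow).foldl (fun d p => d.modify p.1 [] (· ++ [p.2])) PySem.Dict.empty := by
    rw [List.foldl_map]
    rfl
  have hbucket : ∀ s, ((student_table.foldl
      (fun (buckets : PySem.Dict String (List Int)) student =>
        buckets.modify ((PySem.List.pyGet? GROUP_SIGNS
          (PySem.Int.mod ((PySem.List.pyGet? student 0).getD 0) (GROUP_SIGNS.length : Int))).getD "")
          [] (· ++ [(PySem.List.pyGet? student 0).getD 0]))
      PySem.Dict.empty).getD s []) =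
      ((student_table.map pvRow).filter (fun p => p.1 == s)).map (·.2) := by
    intro s
    rw [hfold, PySem.Dict.getD_foldl_modify_append]
    rfl
  simp only [create_data_to_group_table_alt, hsigns,
    PySem.List.foldl_append_eq_flatMap, List.nil_append]
  congr 1
  funext s
  rw [hbucket]

-- the three sign filters together are a permutation of the table
lemma tri_filter_perm (ps : List (String × Int))
    (h : ∀ p ∈ ps, p.1 = "C" ∨ p.1 = "A" ∨ p.1 = "B") :
    (ps.filter (fun p => p.1 == "A") ++ ps.filter (fun p => p.1 == "B") ++
      ps.filter (fun p => p.1 == "C")).Perm ps := by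
  induction ps with
  | nil => simp
  | cons p ps ih =>
    have hps : ∀ q ∈ ps, q.1 = "C" ∨ q.1 = "A" ∨ q.1 = "B" := fun q hq => h q (List.mem_cons_of_mem _ hq)
    rcases h p (List.mem_cons_self) with hp | hp | hp
    · -- p goes to the "C" segment
      have : (ps.filter (fun p => p.1 == "A") ++ ps.filter (fun p => p.1 == "B")) ++
          p :: ps.filter (fun p => p.1 == "C") |>.Perm (p :: (ps.filter (fun p => p.1 == "A") ++
            ps.filter (fun p => p.1 == "B") ++ ps.filter (fun p => p.1 == "C"))) := by
        simpa [List.append_assoc] using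
          (List.perm_middle (a := p)
            (l₁ := ps.filter (fun p => p.1 == "A") ++ ps.filter (fun p => p.1 == "B"))
            (l₂ := ps.filter (fun p => p.1 == "C")))
      simpa [List.filter_cons, hp] using this.trans ((ih hps).cons p)
    · simpa [List.filter_cons, hp] using (ih hps).cons p
    · have : ps.filter (fun p => p.1 == "A") ++
          (p :: ps.filter (fun p => p.1 == "B") ++ ps.filter (fun p => p.1 == "C")) |>.Perm
          (p :: (ps.filter (fun p => p.1 == "A") ++ ps.filter (fun p => p.1 == "B") ++
            ps.filter (fun p => p.1 == "C"))) := by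
        simpa [List.append_assoc] using
          (List.perm_middle (a := p) (l₁ := ps.filter (fun p => p.1 == "A"))
            (l₂ := ps.filter (fun p => p.1 == "B") ++ ps.filter (fun p => p.1 == "C")))
      simpa [List.filter_cons, hp, List.append_assoc] using this.trans ((ih hps).cons p)
  
-- one bucket, re-paired with its sign, is exactly the filtered rows
lemma part_perm (ps : List (String × Int)) (s : String) :
    ((PySem.List.sorted ((ps.filter (fun p => p.1 == s)).map (·.2)) (fun x => x) false).map
      (fun number => (s, number))).Perm (ps.filter (fun p => p.1 == s)) := by
  have h1 := (PySem.List.sorted_perm ((ps.filter (fun p => p.1 == s)).map (·.2)) (fun x => x) false).map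
    (fun number => (s, number))
  have h2 : ((ps.filter (fun p => p.1 == s)).map (·.2)).map (fun number => (s, number)) =
      ps.filter (fun p => p.1 == s) := by
    rw [List.map_map]
    have hpt : ∀ p ∈ ps.filter (fun p => p.1 == s),
        ((fun number => (s, number)) ∘ (fun x => x.2)) p = id p := by
      intro p hp
      have hs : p.1 = s := by simpa using List.of_mem_filter hp
      simp [Function.comp, ← hs]
    rw [List.map_congr_left hpt, List.map_id]
  rw [h2] at h1
  exact h1

lemma part_pairwise (ps : List (String × Int)) (s : String) :
    ((PySem.List.sorted ((ps.filter (fun p => p.1 == s)).map (·.2)) (fun x => x) false).map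
      (fun number => (s, number))).Pairwise (fun a b => pvKey a ≤ pvKey b) := by
  rw [List.pairwise_map]
  refine (PySem.List.sorted_pairwise _ _).imp ?_
  intro a b hab
  simp only [pvKey]
  rw [Prod.Lex.toLex_le_toLex]
  exact Or.inr ⟨rfl, hab⟩

lemma pvKey_lt {s t : String} (hst : s.toList < t.toList) (a b : Int) :
    toLex ((s.toList, a)) ≤ toLex ((t.toList, b)) := by
  rw [Prod.Lex.toLex_le_toLex]
  exact Or.inl hst

lemma mem_part_fst {ps : List (String × Int)} {s : String} {q : String × Int}
    (hq : q ∈ (PySem.List.sorted ((ps.filter (fun p => p.1 == s)).map (·.2)) (fun x => x) false).map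
      (fun number => (s, number))) : q.1 = s := by
  rcases List.mem_map.1 hq with ⟨n, _, rfl⟩
  rfl

lemma main_eq (ps : List (String × Int))
    (h : ∀ p ∈ ps, p.1 = "C" ∨ p.1 = "A" ∨ p.1 = "B") :
    PySem.List.sorted ps pvKey false =
      (["A", "B", "C"] : List String).flatMap (fun s =>
        (PySem.List.sorted ((ps.filter (fun p => p.1 == s)).map (·.2)) (fun x => x) false).map
          (fun number => (s, number))) := by
  apply List.eq_of_perm_of_sorted (le := fun a b => pvKey a ≤ pvKey b)
  · -- antisymmetry: the key is injective
    intro a b _ _ hab hba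
    have hk : pvKey a = pvKey b := le_antisymm hab hba
    have hpair : (a.1.toList, a.2) = (b.1.toList, b.2) := toLex.injective hk
    obtain ⟨hl, hr⟩ := Prod.mk.inj hpair
    exact Prod.ext (String.toList_inj.mp hl) hr
  · exact PySem.List.sorted_pairwise ps pvKey
  · -- the concatenation of the three parts is sorted
    simp only [List.flatMap_cons, List.flatMap_nil, List.append_nil, ← List.append_assoc]
    rw [List.pairwise_append]
    refine ⟨?_, part_pairwise ps "C", ?_⟩
    · rw [List.pairwise_append]
      refine ⟨part_pairwise ps "A", part_pairwise ps "B", ?_⟩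
      intro a ha b hb
      have ha1 := mem_part_fst ha
      have hb1 := mem_part_fst hb
      simp only [pvKey]
      rw [ha1, hb1]
      exact pvKey_lt (by decide) _ _
    · intro a ha b hb
      have hb1 := mem_part_fst hb
      have ha1 : a.1 = "A" ∨ a.1 = "B" := by
        rcases List.mem_append.1 ha with h' | h'
        · exact Or.inl (mem_part_fst h')
        · exact Or.inr (mem_part_fst h')
      simp only [pvKey]
      rcases ha1 with h' | h' <;> rw [h', hb1] <;> exact pvKey_lt (by decide) _ _
  · -- both sides are permutations of ps
    refine (PySem.List.sorted_perm ps pvKey false).trans ?_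
    refine ((tri_filter_perm ps h).symm).trans ?_
    simp only [List.flatMap_cons, List.flatMap_nil, List.append_nil, ← List.append_assoc]
    exact (((part_perm ps "A").append (part_perm ps "B")).append (part_perm ps "C")).symm

-- ===== VERDICT (by name: the statement is the Claim_ definition above) =====
theorem create_data_to_group_table_spec : Claim_equal_create_data_to_group_table := by
  intro student_table _ _
  unfold Spec_create_data_to_group_table
  rw [portA_eq, portB_eq]
  exact main_eq _ (by intro p hp; rcases List.mem_map.1 hp with ⟨st, _, rfl⟩; exact pvRow_fst st)
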